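-- pv_equiv track=rewrite | github.com/quantum-programming/error-crafting | UnifiedCompiler/coherent/solovay_kitaev.py | conjugate_gateword
-- ===== SOURCE A (Python) =====
-- def conjugate_gateword(gateword):
--     gatelist = [s for s in gateword]
--     gatelist_conj = []
--     for g in gatelist:
--         if g=="S":
--             gatelist_conj.append("SSS")
--         elif g=="T":
--             gatelist_conj.append("SSST")
--         else:
--             gatelist_conj.append(g)
--     gateword_conj = "".join(gatelist_conj)
--     return gateword_conj
-- ===== SOURCE B (Python) =====
-- def conjugate_gateword(gateword):
--     # S first, then T, so the S's injected by the T-expansion are not re-expanded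
--     return gateword.replace("S", "SSS").replace("T", "SSST")
-- ===== Notes on version B (the rewrite author's own statement) =====
-- stated objective: idiomatic
-- what changed: Replaces the per-character list-building loop and join with two ordered global str.replace substitutions (S->SSS first, then T->SSST), so the S's injected by the T-expansion are never re-expanded.
import Mathlib
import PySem

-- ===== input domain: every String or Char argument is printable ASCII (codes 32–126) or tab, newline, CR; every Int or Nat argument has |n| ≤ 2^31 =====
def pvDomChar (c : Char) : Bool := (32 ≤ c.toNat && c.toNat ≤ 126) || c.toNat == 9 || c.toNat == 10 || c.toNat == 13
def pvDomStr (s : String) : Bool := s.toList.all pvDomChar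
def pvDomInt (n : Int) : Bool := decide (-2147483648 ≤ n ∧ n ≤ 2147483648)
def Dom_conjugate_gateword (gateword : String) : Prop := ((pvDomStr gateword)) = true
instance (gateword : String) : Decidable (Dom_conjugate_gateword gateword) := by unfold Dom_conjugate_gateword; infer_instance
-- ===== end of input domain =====

-- B replaces the per-character loop+join with two ordered global replace substitutions (idiomatic).


-- ===== PORT A =====
def conjugate_gateword (gateword : String) : String :=
  let gatelist : List Char := gateword.toList
  let gatelist_conj : List String :=
    gatelist.foldl (fun acc g =>
      if g = 'S' then acc ++ ["SSS"]
      else if g = 'T' then acc ++ ["SSST"]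
      else acc ++ [String.ofList [g]]) []
  PySem.Str.join "" gatelist_conj

-- ===== PORT B =====
def conjugate_gateword_alt (gateword : String) : String :=
  PySem.Str.replace (PySem.Str.replace gateword "S" "SSS") "T" "SSST"

-- ===== PRECONDITION & SPEC =====
def Spec_conjugate_gateword (gateword : String) (out : String) : Prop := out = conjugate_gateword_alt gateword
instance (gateword : String) (out : String) : Decidable (Spec_conjugate_gateword gateword out) := by unfold Spec_conjugate_gateword; infer_instance

-- ===== CLAIM (what is proved, stated in full; the proofs are below) =====
def Claim_equal_conjugate_gateword : Prop := ∀ (gateword : String), Dom_conjugate_gateword gateword → Spec_conjugate_gateword gateword (conjugate_gateword gateword)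

-- ===== LEMMAS AND PROOFS =====

-- replace.go with enough fuel and a single-character pattern is a flatMap
lemma replace_go_single (c : Char) (new : List Char) :
    ∀ (fuel : Nat) (l acc : List Char), l.length ≤ fuel →
      PySem.Chars.replace.go [c] new fuel l acc
        = acc.reverse ++ l.flatMap (fun x => if x = c then new else [x]) := by
  intro fuel
  induction fuel with
  | zero =>
    intro l acc h
    have : l = [] := List.eq_nil_of_length_eq_zero (Nat.le_zero.mp h)
    subst this
    simp [PySem.Chars.replace.go]
  | succ n ih =>
    intro l acc h
    cases l with
    | nil => simp [PySem.Chars.replace.go]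
    | cons x t =>
      by_cases hx : x = c
      · subst hx
        have hpre : List.isPrefixOf [x] (x :: t) = true := by
          simp [List.isPrefixOf]
        simp only [PySem.Chars.replace.go, hpre, if_pos]
        rw [ih]
        · simp
        · simpa using Nat.le_of_succ_le_succ h
      · have hpre : List.isPrefixOf [c] (x :: t) = false := by
          simp [List.isPrefixOf]
          exact fun hc => hx hc.symm
        simp only [PySem.Chars.replace.go, hpre]
        rw [ih t (x :: acc) (by simpa using Nat.le_of_succ_le_succ h)]
        simp [hx]

lemma replace_single (l : List Char) (c : Char) (new : List Char) :
    PySem.Chars.replace l [c] new = l.flatMap (fun x => if x = c then new else [x]) := by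
  simp [PySem.Chars.replace, replace_go_single c new l.length l [] (Nat.le_refl _)]

-- A's foldl-built piece list, characterised
lemma foldA (l : List Char) (acc : List String) :
    l.foldl (fun acc g =>
      if g = 'S' then acc ++ ["SSS"]
      else if g = 'T' then acc ++ ["SSST"]
      else acc ++ [String.ofList [g]]) acc
    = acc ++ l.map (fun g => if g = 'S' then "SSS" else if g = 'T' then "SSST" else String.ofList [g]) := by
  induction l generalizing acc with
  | nil => simp
  | cons x t ih =>
    simp only [List.foldl_cons, List.map_cons, ih]
    by_cases hS : x = 'S'
    · simp [hS]
    · by_cases hT : x = 'T' <;> simp [hS, hT]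

lemma join_empty_flatten (parts : List (List Char)) :
    PySem.Chars.join [] parts = parts.flatten := by
  induction parts with
  | nil => simp [PySem.Chars.join_nil]
  | cons p rest ih =>
    cases rest with
    | nil => simp [PySem.Chars.join, List.intercalate]
    | cons q r => rw [PySem.Chars.join_cons_cons, ih]; simp

-- pointwise: A's piece for one char equals the T-pass applied to the S-pass piece
lemma piece_eq (x : Char) :
    (if x = 'S' then "SSS" else if x = 'T' then "SSST" else String.ofList [x]).toList
      = (if x = 'S' then ['S','S','S'] else [x]).flatMap
          (fun y => if y = 'T' then "SSST".toList else [y]) := by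
  by_cases hS : x = 'S'
  · subst hS; decide
  · by_cases hT : x = 'T'
    · subst hT; simp
    · simp [hS, hT, String.toList_ofList]

theorem conjugate_gateword_spec : Claim_equal_conjugate_gateword := by
  unfold Claim_equal_conjugate_gateword
  intro gw _
  unfold Spec_conjugate_gateword conjugate_gateword conjugate_gateword_alt
  apply String.ext
  rw [PySem.Str.toList_join, PySem.Str.toList_replace, PySem.Str.toList_replace]
  have hS : "S".toList = ['S'] := rfl
  have hT : "T".toList = ['T'] := rfl
  have hSSS : "SSS".toList = ['S','S','S'] := rfl
  rw [hS, hT, hSSS, replace_single, replace_single, foldA, List.nil_append,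
    List.map_map]
  have hempty : "".toList = ([] : List Char) := rfl
  rw [hempty, join_empty_flatten, ← List.flatMap_def]
  rw [List.flatMap_assoc]
  have hfun := funext piece_eq
  simp only [Function.comp_def]
  exact congrFun (congrArg List.flatMap hfun) gw.toList
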